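-- pv_equiv track=rewrite | github.com/alexeychern0v/holbertonschool-Markdown2HTML | markdown2html.py | parse_heading
-- ===== SOURCE A (Python) =====
-- def parse_heading(line):
--     """Parse a Markdown heading line and convert it to HTML"""
--     if line.startswith('#'):
--         level = 0
--         for char in line:
--             if char == '#':
--                 level += 1
--             else:
--                 break
--
--         if 1 <= level <= 6:
--             heading_text = line[level:].strip()
--             heading_text = parse_inline_formatting(heading_text)
--             return f"<h{level}>{heading_text}</h{level}>\n"
--
--     return None
--
-- def parse_inline_formatting(text):
--     """Parse inline Markdown formatting (bold and emphasis) to HTML"""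
--     while '**' in text:
--         start = text.find('**')
--         if start != -1:
--             end = text.find('**', start + 2)
--             if end != -1:
--                 bold_text = text[start + 2:end]
--                 text = text[:start] + f'<b>{bold_text}</b>' + text[end + 2:]
--             else:
--                 break
--         else:
--             break
--
--     while '__' in text:
--         start = text.find('__')
--         if start != -1:
--             end = text.find('__', start + 2)
--             if end != -1:
--                 em_text = text[start + 2:end]
--                 text = text[:start] + f'<em>{em_text}</em>' + text[end + 2:]
--             else:
--                 break
--         else:
--             break
--
--     return text
-- ===== SOURCE B (Python) =====
-- def _fmt(text, delim, tag):
--     parts = text.split(delim)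
--     res = parts[0]
--     i = 1
--     while i + 1 < len(parts):
--         res += f'<{tag}>{parts[i]}</{tag}>{parts[i + 1]}'
--         i += 2
--     if i < len(parts):
--         res += delim + parts[i]
--     return res
--
--
-- def parse_heading(line):
--     rest = line.lstrip('#')
--     level = len(line) - len(rest)
--     if 1 <= level <= 6:
--         text = _fmt(_fmt(rest.strip(), '**', 'b'), '__', 'em')
--         return f"<h{level}>{text}</h{level}>\n"
--     return None
-- ===== Notes on version B (the rewrite author's own statement) =====
-- stated objective: idiomatic
-- what changed: A's inline-formatting pass repeatedly rescans the whole string with find() and rebuilds it slice by slice for each delimiter pair; B splits the text once per delimiter with str.split and joins the pieces pairwise into tags, and computes the heading level with lstrip instead of a counting loop.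
import Mathlib
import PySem

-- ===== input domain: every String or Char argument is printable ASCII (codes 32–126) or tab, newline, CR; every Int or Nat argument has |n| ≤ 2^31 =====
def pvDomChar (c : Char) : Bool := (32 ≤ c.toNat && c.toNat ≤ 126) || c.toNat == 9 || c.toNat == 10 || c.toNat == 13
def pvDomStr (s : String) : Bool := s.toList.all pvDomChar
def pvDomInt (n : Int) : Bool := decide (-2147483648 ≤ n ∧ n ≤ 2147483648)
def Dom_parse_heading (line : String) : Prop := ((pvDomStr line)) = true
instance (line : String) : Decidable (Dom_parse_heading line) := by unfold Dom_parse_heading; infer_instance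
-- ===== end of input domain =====

-- B replaces A's repeated find/slice/rebuild scanning of each delimiter pair by a single
-- str.split per delimiter followed by joining the pieces pairwise (objective: idiomatic).

-- ===== PORT A =====

-- the `for char in line: if char == '#': level += 1 else: break` loop
def pvLevelLoop : List Char → Nat → Nat
  | [], level => level
  | ch :: rest, level => if ch = '#' then pvLevelLoop rest (level + 1) else level

-- one of A's two identical `while delim in text:` rewrite loops (delim = [c,c]);
-- the Python loop is unbounded, `fuel` is a totality guard (callers pass length+1, always enough)
def pvPassA (c : Char) (opn cls : List Char) : Nat → List Char → List Char
  | 0, text => text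
  | fuel + 1, text =>
    if PySem.Chars.isIn [c, c] text then
      let start := PySem.Chars.find text [c, c]
      if start ≠ -1 then
        let e := PySem.Chars.findFrom text [c, c] (start + 2) none
        if e ≠ -1 then
          let inner := PySem.List.slice text (some (start + 2)) (some e)
          pvPassA c opn cls fuel
            (PySem.List.slice text none (some start) ++ opn ++ inner ++ cls ++
              PySem.List.slice text (some (e + 2)) none)
        else text
      else text
    else text

-- parse_inline_formatting: the '**' loop, then the '__' loop
def pvInlineA (text : List Char) : List Char :=
  let t1 := pvPassA '*' "<b>".toList "</b>".toList (text.length + 1) text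
  pvPassA '_' "<em>".toList "</em>".toList (t1.length + 1) t1

def parse_heading (line : String) : Option String :=
  let cs := line.toList
  if PySem.Chars.startswith cs "#".toList then
    let level := pvLevelLoop cs 0
    if 1 ≤ level ∧ level ≤ 6 then
      let headingText := PySem.Chars.strip (PySem.List.slice cs (some (level : Int)) none)
      let headingText := pvInlineA headingText
      some (String.ofList ("<h".toList ++ (PySem.Int.toStr level).toList ++ ">".toList ++
        headingText ++ "</h".toList ++ (PySem.Int.toStr level).toList ++ ">\n".toList))
    else none
  else none

-- ===== PORT B =====

-- the `while i + 1 < len(parts)` pairing loop of _fmt, consuming parts[1:] two at a time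
def pvPairsB (c : Char) (opn cls : List Char) : List (List Char) → List Char
  | a :: b :: rest => opn ++ a ++ cls ++ b ++ pvPairsB c opn cls rest
  | [a] => [c, c] ++ a
  | [] => []

-- _fmt: split on the delimiter, keep parts[0], join the rest pairwise
def pvFmtB (c : Char) (opn cls : List Char) (text : List Char) : List Char :=
  match PySem.Chars.splitOn text [c, c] with
  | [] => []   -- unreachable: str.split never returns an empty list
  | p0 :: rest => p0 ++ pvPairsB c opn cls rest

def parse_heading_alt (line : String) : Option String :=
  let cs := line.toList
  let rest := cs.dropWhile (· = '#')   -- hand port of line.lstrip('#'): drop leading '#'s (exact)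
  let level := cs.length - rest.length
  if 1 ≤ level ∧ level ≤ 6 then
    let text := pvFmtB '_' "<em>".toList "</em>".toList
      (pvFmtB '*' "<b>".toList "</b>".toList (PySem.Chars.strip rest))
    some (String.ofList ("<h".toList ++ (PySem.Int.toStr level).toList ++ ">".toList ++
      text ++ "</h".toList ++ (PySem.Int.toStr level).toList ++ ">\n".toList))
  else none

-- ===== PRECONDITION & SPEC =====
def Spec_parse_heading (line : String) (out : Option String) : Prop := out = parse_heading_alt line
instance (line : String) (out : Option String) : Decidable (Spec_parse_heading line out) := by unfold Spec_parse_heading; infer_instance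

-- ===== CLAIM (what is proved, stated in full; the proofs are below) =====
def Claim_equal_parse_heading : Prop := ∀ (line : String), Dom_parse_heading line → Spec_parse_heading line (parse_heading line)

-- ===== LEMMAS AND PROOFS =====

-- pvOcc c s k: an occurrence of the delimiter [c,c] at position k of s
def pvOcc (c : Char) (s : List Char) (k : Nat) : Prop := s[k]? = some c ∧ s[k + 1]? = some c

-- pvClean c s: s contains no [c,c] and does not end in c (so no occurrence can cross
-- a junction s ++ t into t)
def pvClean (c : Char) (s : List Char) : Prop := (∀ k, ¬ pvOcc c s k) ∧ s.getLast? ≠ some c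

-- reference form of Python's str.split on the delimiter [c,c]
def pvRefSplit (c : Char) : List Char → List (List Char)
  | [] => [[]]
  | x :: rest =>
    if [c, c].isPrefixOf (x :: rest) then [] :: pvRefSplit c (rest.drop 1)
    else (pvRefSplit c rest).modifyHead (x :: ·)
termination_by l => l.length
decreasing_by
  · simp
  · simp

theorem pvPrefix2_iff (c : Char) (t : List Char) :
    [c, c] <+: t ↔ t[0]? = some c ∧ t[1]? = some c := by
  match t with
  | [] => simp
  | [a] => simp [List.cons_prefix_cons]
  | a :: b :: r =>
    simp only [List.cons_prefix_cons, List.nil_prefix, and_true]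
    constructor <;> rintro ⟨h1, h2⟩ <;> simp_all

theorem pvOcc_iff_drop (c : Char) (s : List Char) (k : Nat) :
    pvOcc c s k ↔ [c, c] <+: s.drop k := by
  rw [pvPrefix2_iff]
  simp [pvOcc, List.getElem?_drop]

theorem pvInfix_iff (c : Char) (s : List Char) :
    [c, c] <:+: s ↔ ∃ k, pvOcc c s k := by
  rw [← PySem.Chars.isIn_iff_infix, ← PySem.Chars.exists_prefix_drop_iff_isIn]
  exact exists_congr fun k => (pvOcc_iff_drop c s k).symm

theorem pvOcc_lt {c : Char} {s : List Char} {k : Nat} (h : pvOcc c s k) : k + 1 < s.length :=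
  (List.getElem?_eq_some_iff.mp h.2).1

theorem pvOcc_cons {c x : Char} {rest : List Char} {k : Nat} :
    pvOcc c (x :: rest) (k + 1) ↔ pvOcc c rest k := by
  simp [pvOcc, List.getElem?_cons_succ]

theorem pvFind_eq {c : Char} {s : List Char} {i : Nat} (h1 : pvOcc c s i)
    (h2 : ∀ k < i, ¬ pvOcc c s k) : PySem.Chars.find s [c, c] = (i : Int) := by
  have hinf : [c, c] <:+: s := (pvInfix_iff c s).2 ⟨i, h1⟩
  have h0 : 0 ≤ PySem.Chars.find s [c, c] := (PySem.Chars.find_nonneg_iff s [c, c]).2 hinf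
  obtain ⟨hp, hmin⟩ := PySem.Chars.find_spec h0
  have hj : pvOcc c s (PySem.Chars.find s [c, c]).toNat := (pvOcc_iff_drop c s _).2 hp
  have hni : ¬ (PySem.Chars.find s [c, c]).toNat < i := fun hlt => h2 _ hlt hj
  have hni' : ¬ i < (PySem.Chars.find s [c, c]).toNat := fun hlt =>
    hmin i hlt ((pvOcc_iff_drop c s i).1 h1)
  omega

theorem pvFind_spec' {c : Char} {s : List Char} {i : Nat}
    (h : PySem.Chars.find s [c, c] = (i : Int)) :
    pvOcc c s i ∧ ∀ k < i, ¬ pvOcc c s k := by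
  have h0 : 0 ≤ PySem.Chars.find s [c, c] := by rw [h]; exact Int.natCast_nonneg i
  obtain ⟨hp, hmin⟩ := PySem.Chars.find_spec h0
  rw [h, Int.toNat_natCast] at hp hmin
  exact ⟨(pvOcc_iff_drop c s i).2 hp,
    fun k hk hkocc => hmin k hk ((pvOcc_iff_drop c s k).1 hkocc)⟩

theorem pvFind_neg (c : Char) (s : List Char) :
    PySem.Chars.find s [c, c] = -1 ↔ ∀ k, ¬ pvOcc c s k := by
  rw [PySem.Chars.find_eq_neg_one_iff, pvInfix_iff]
  exact not_exists

theorem pvFind_cases (c : Char) (s : List Char) :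
    PySem.Chars.find s [c, c] = -1 ∨ ∃ i : Nat, PySem.Chars.find s [c, c] = (i : Int) := by
  by_cases h : 0 ≤ PySem.Chars.find s [c, c]
  · exact Or.inr ⟨(PySem.Chars.find s [c, c]).toNat, (Int.toNat_of_nonneg h).symm⟩
  · left
    have := PySem.Chars.neg_one_le_find s [c, c]
    omega

theorem pvOcc_append {c : Char} {pre : List Char} (hc : pvClean c pre) (s : List Char) (k : Nat) :
    pvOcc c (pre ++ s) k ↔ pre.length ≤ k ∧ pvOcc c s (k - pre.length) := by
  constructor
  · intro hk
    have h1 := hk.1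
    have h2 := hk.2
    by_cases hk1 : k + 1 < pre.length
    · exfalso
      apply hc.1 k
      rw [List.getElem?_append_left (show k < pre.length by omega)] at h1
      rw [List.getElem?_append_left hk1] at h2
      exact ⟨h1, h2⟩
    · by_cases hk2 : k < pre.length
      · exfalso
        apply hc.2
        rw [List.getLast?_eq_getElem?]
        rw [List.getElem?_append_left hk2] at h1
        rw [show pre.length - 1 = k by omega]
        exact h1
      · rw [List.getElem?_append_right (show pre.length ≤ k by omega)] at h1
        rw [List.getElem?_append_right (show pre.length ≤ k + 1 by omega)] at h2
        rw [show k + 1 - pre.length = k - pre.length + 1 by omega] at h2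
        exact ⟨by omega, h1, h2⟩
  · rintro ⟨hk, h1, h2⟩
    constructor
    · rw [List.getElem?_append_right hk]
      exact h1
    · rw [List.getElem?_append_right (show pre.length ≤ k + 1 by omega)]
      rw [show k + 1 - pre.length = k - pre.length + 1 by omega]
      exact h2

theorem pvClean_append {c : Char} {a b : List Char} (ha : pvClean c a) (hb : pvClean c b) :
    pvClean c (a ++ b) := by
  constructor
  · intro k hk
    rw [pvOcc_append ha] at hk
    exact hb.1 _ hk.2
  · rcases b with _ | ⟨x, xs⟩
    · simpa using ha.2
    · rw [List.getLast?_append_of_ne_nil _ (by simp)]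
      exact hb.2

theorem pvClean_iff (c : Char) (s : List Char) :
    pvClean c s ↔ (PySem.Chars.isIn [c, c] s = false ∧ s.getLast? ≠ some c) := by
  unfold pvClean
  rw [PySem.Chars.isIn_eq_false_iff, pvInfix_iff]
  simp [not_exists]

theorem pvFind_append {c : Char} {pre : List Char} (hpre : pvClean c pre) (s : List Char)
    {i : Nat} (h : PySem.Chars.find s [c, c] = (i : Int)) :
    PySem.Chars.find (pre ++ s) [c, c] = ((pre.length + i : Nat) : Int) := by
  obtain ⟨hocc, hmin⟩ := pvFind_spec' h
  apply pvFind_eq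
  · rw [pvOcc_append hpre]
    exact ⟨by omega, by rwa [show pre.length + i - pre.length = i by omega]⟩
  · intro k hk hkocc
    rw [pvOcc_append hpre] at hkocc
    exact hmin _ (by omega) hkocc.2

theorem pvFind_append_neg {c : Char} {pre : List Char} (hpre : pvClean c pre) (s : List Char)
    (h : PySem.Chars.find s [c, c] = -1) :
    PySem.Chars.find (pre ++ s) [c, c] = -1 := by
  rw [pvFind_neg] at h ⊢
  intro k hk
  rw [pvOcc_append hpre] at hk
  exact h _ hk.2

theorem pvTake_clean {c : Char} {s : List Char} {i : Nat}
    (h : PySem.Chars.find s [c, c] = (i : Int)) : pvClean c (s.take i) := by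
  obtain ⟨hocc, hmin⟩ := pvFind_spec' h
  constructor
  · intro k hk
    have h1 := hk.1
    have h2 := hk.2
    rw [List.getElem?_take] at h1 h2
    by_cases hki : k + 1 < i
    · rw [if_pos hki] at h2
      rw [if_pos (by omega)] at h1
      exact hmin k (by omega) ⟨h1, h2⟩
    · rw [if_neg hki] at h2
      simp at h2
  · intro hlast
    rw [List.getLast?_eq_getElem?] at hlast
    have hlen : (s.take i).length = i := by
      have := pvOcc_lt hocc
      simp [List.length_take]
      omega
    rw [hlen] at hlast
    rcases Nat.eq_zero_or_pos i with hi | hi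
    · rw [hi] at hlast
      simp at hlast
    · rw [List.getElem?_take, if_pos (by omega)] at hlast
      exact hmin (i - 1) (by omega)
        ⟨hlast, by rw [show i - 1 + 1 = i by omega]; exact hocc.1⟩

theorem pvDecomp {c : Char} {s : List Char} {i : Nat} (h : pvOcc c s i) :
    s = s.take i ++ [c, c] ++ s.drop (i + 2) := by
  obtain ⟨hi1, he1⟩ := List.getElem?_eq_some_iff.mp h.1
  obtain ⟨hi2, he2⟩ := List.getElem?_eq_some_iff.mp h.2
  conv_lhs => rw [← List.take_append_drop i s]
  rw [List.drop_eq_getElem_cons hi1, List.drop_eq_getElem_cons hi2, he1, he2]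
  simp

theorem pvModifyHead_id {α : Type} (l : List α) : l.modifyHead (fun x => x) = l := by
  cases l <;> rfl

theorem pvGo (c : Char) : ∀ (fuel : Nat) (l cur : List Char) (acc : List (List Char)),
    l.length ≤ fuel →
    PySem.Chars.splitOn.go [c, c] fuel l cur acc
      = acc.reverse ++ (pvRefSplit c l).modifyHead (cur.reverse ++ ·) := by
  intro fuel
  induction fuel with
  | zero =>
    intro l cur acc h
    have hl : l = [] := by
      cases l
      · rfl
      · simp at h
    subst hl
    simp [PySem.Chars.splitOn.go, pvRefSplit]
  | succ fuel ih =>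
    intro l cur acc h
    rcases l with _ | ⟨ch, rest⟩
    · simp [PySem.Chars.splitOn.go, pvRefSplit]
    · by_cases hp : [c, c].isPrefixOf (ch :: rest)
      · have hstep : PySem.Chars.splitOn.go [c, c] (fuel + 1) (ch :: rest) cur acc
            = PySem.Chars.splitOn.go [c, c] fuel (rest.drop 1) [] (cur.reverse :: acc) := by
          simp [PySem.Chars.splitOn.go, hp]
        rw [hstep, ih _ _ _ (by simp at h ⊢; omega)]
        have hr : pvRefSplit c (ch :: rest) = [] :: pvRefSplit c (rest.drop 1) := by
          rw [pvRefSplit]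
          rw [if_pos hp]
        rw [hr]
        simp [pvModifyHead_id]
      · have hstep : PySem.Chars.splitOn.go [c, c] (fuel + 1) (ch :: rest) cur acc
            = PySem.Chars.splitOn.go [c, c] fuel rest (ch :: cur) acc := by
          simp [PySem.Chars.splitOn.go, hp]
        rw [hstep, ih _ _ _ (by simp at h; omega)]
        have hr : pvRefSplit c (ch :: rest) = (pvRefSplit c rest).modifyHead (ch :: ·) := by
          rw [pvRefSplit]
          rw [if_neg hp]
        rw [hr, List.modifyHead_modifyHead]
        congr 2
        funext x
        simp

theorem pvSplitOn_eq (c : Char) (s : List Char) :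
    PySem.Chars.splitOn s [c, c] = pvRefSplit c s := by
  rw [PySem.Chars.splitOn, pvGo c _ _ _ _ (by omega)]
  simp [pvModifyHead_id]

theorem pvRefSplit_ne_nil_aux (c : Char) : ∀ (n : Nat) (l : List Char), l.length ≤ n →
    pvRefSplit c l ≠ [] := by
  intro n
  induction n with
  | zero =>
    intro l h
    have hl : l = [] := by
      cases l
      · rfl
      · simp at h
    subst hl
    simp [pvRefSplit]
  | succ n ih =>
    intro l h
    rcases l with _ | ⟨x, rest⟩
    · simp [pvRefSplit]
    · rw [pvRefSplit]
      split
    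
      · simp
      · have hne : pvRefSplit c rest ≠ [] := ih rest (by simp at h; omega)
        rcases h0 : pvRefSplit c rest with _ | ⟨p, r⟩
        · exact absurd h0 hne
        · simp

theorem pvRefSplit_ne_nil (c : Char) (l : List Char) : pvRefSplit c l ≠ [] :=
  pvRefSplit_ne_nil_aux c l.length l le_rfl

theorem pvRefSplit_no {c : Char} : ∀ {s : List Char}, (∀ k, ¬ pvOcc c s k) →
    pvRefSplit c s = [s] := by
  intro s
  induction s with
  | nil => intro _; simp [pvRefSplit]
  | cons x rest ih =>
    intro h
    have hp : ¬ [c, c].isPrefixOf (x :: rest) := by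
      intro hp
      exact h 0 ((pvPrefix2_iff c _).mp (List.isPrefixOf_iff_prefix.mp hp))
    rw [pvRefSplit, if_neg hp, ih (fun k hk => h (k + 1) (pvOcc_cons.mpr hk))]
    simp

theorem pvRefSplit_found (c : Char) : ∀ (s : List Char) (i : Nat),
    PySem.Chars.find s [c, c] = (i : Int) →
    pvRefSplit c s = s.take i :: pvRefSplit c (s.drop (i + 2)) := by
  intro s
  induction s with
  | nil =>
    intro i h
    exfalso
    obtain ⟨hocc, -⟩ := pvFind_spec' h
    simp [pvOcc] at hocc
  | cons x rest ih =>
    intro i h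
    obtain ⟨hocc, hmin⟩ := pvFind_spec' h
    rcases Nat.eq_zero_or_pos i with hi | hi
    · subst hi
      have hp : [c, c].isPrefixOf (x :: rest) :=
        List.isPrefixOf_iff_prefix.mpr ((pvPrefix2_iff _ _).mpr hocc)
      rw [pvRefSplit, if_pos hp]
      simp
    · have hp : ¬ [c, c].isPrefixOf (x :: rest) := by
        intro hp
        exact hmin 0 hi ((pvPrefix2_iff _ _).mp (List.isPrefixOf_iff_prefix.mp hp))
      have hocc' : pvOcc c rest (i - 1) :=
        pvOcc_cons.mp (by rwa [show i - 1 + 1 = i by omega])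
      have hmin' : ∀ k < i - 1, ¬ pvOcc c rest k := fun k hk hkocc =>
        hmin (k + 1) (by omega) (pvOcc_cons.mpr hkocc)
      rw [pvRefSplit, if_neg hp, ih (i - 1) (pvFind_eq hocc' hmin')]
      have h1 : (x :: rest).take i = x :: rest.take (i - 1) := by
        rw [show i = (i - 1) + 1 by omega]
        simp
      have h2 : (x :: rest).drop (i + 2) = rest.drop (i - 1 + 2) := by
        rw [show i + 2 = (i - 1 + 2) + 1 by omega]
        simp
      rw [h1, h2]
      simp [List.modifyHead]

theorem pvDrop_append_len (pre s : List Char) (n : Nat) :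
    (pre ++ s).drop (pre.length + n) = s.drop n := by
  rw [List.drop_append, List.drop_eq_nil_of_le (by omega),
    show pre.length + n - pre.length = n by omega]
  simp

theorem pvTake_append_len (pre s : List Char) (n : Nat) :
    (pre ++ s).take (pre.length + n) = pre ++ s.take n := by
  rw [List.take_append, List.take_of_length_le (by omega),
    show pre.length + n - pre.length = n by omega]

-- one rewriting step of A's while-loop, shared by the two lemmas below
theorem pvPassA_step {c : Char} {opn cls : List Char} (fuel : Nat) (s : List Char) {i j : Nat}
    (hf : PySem.Chars.find s [c, c] = (i : Int))
    (hg : PySem.Chars.find (s.drop (i + 2)) [c, c] = (j : Int)) :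
    pvPassA c opn cls (fuel + 1) s
      = pvPassA c opn cls fuel
          (s.take i ++ opn ++ (s.drop (i + 2)).take j ++ cls ++ s.drop (i + 2 + j + 2)) := by
  obtain ⟨hocc, -⟩ := pvFind_spec' hf
  have hlen : i + 2 ≤ s.length := by have := pvOcc_lt hocc; omega
  have hIn : PySem.Chars.isIn [c, c] s = true := by
    rw [PySem.Chars.isIn_iff_infix]
    exact (pvInfix_iff c s).2 ⟨i, hocc⟩
  have hff : PySem.Chars.findFrom s [c, c] ((i : Int) + 2) none = ((i + 2 + j : Nat) : Int) := by
    rw [show ((i : Int) + 2) = ((i + 2 : Nat) : Int) by push_cast; ring,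
      PySem.Chars.findFrom_natCast s [c, c] (i + 2) hlen, hg]
    rw [if_neg (by omega)]
    push_cast
    ring
  simp only [pvPassA, hIn, if_true, hf, hff]
  rw [if_pos (show ((i : Int)) ≠ -1 by omega),
    if_pos (show (((i + 2 + j : Nat) : Int)) ≠ -1 by omega)]
  have hs1 : PySem.List.slice s none (some (i : Int)) = s.take i := by
    rw [PySem.List.slice_to s (by omega)]
    simp
  have hs2 : PySem.List.slice s (some ((i : Int) + 2)) (some ((i + 2 + j : Nat) : Int))
      = (s.drop (i + 2)).take j := by
    rw [show ((i : Int) + 2) = ((i + 2 : Nat) : Int) by push_cast; ring, PySem.List.slice_natCast]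
    rw [show i + 2 + j - (i + 2) = j by omega]
  have hs3 : PySem.List.slice s (some (((i + 2 + j : Nat) : Int) + 2)) none
      = s.drop (i + 2 + j + 2) := by
    rw [show (((i + 2 + j : Nat) : Int) + 2) = ((i + 2 + j + 2 : Nat) : Int) by push_cast; ring,
      PySem.List.slice_from s (by omega), Int.toNat_natCast]
  rw [hs1, hs2, hs3]

theorem pvPassA_stop {c : Char} {opn cls : List Char} (fuel : Nat) (s : List Char) {i : Nat}
    (hf : PySem.Chars.find s [c, c] = (i : Int))
    (hg : PySem.Chars.find (s.drop (i + 2)) [c, c] = -1) :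
    pvPassA c opn cls (fuel + 1) s = s := by
  obtain ⟨hocc, -⟩ := pvFind_spec' hf
  have hlen : i + 2 ≤ s.length := by have := pvOcc_lt hocc; omega
  have hIn : PySem.Chars.isIn [c, c] s = true := by
    rw [PySem.Chars.isIn_iff_infix]
    exact (pvInfix_iff c s).2 ⟨i, hocc⟩
  have hff : PySem.Chars.findFrom s [c, c] ((i : Int) + 2) none = -1 := by
    rw [show ((i : Int) + 2) = ((i + 2 : Nat) : Int) by push_cast; ring,
      PySem.Chars.findFrom_natCast s [c, c] (i + 2) hlen, hg]
    simp
  simp only [pvPassA, hIn, if_true, hf, hff]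
  rw [if_pos (show ((i : Int)) ≠ -1 by omega)]
  simp

theorem pvPassA_none {c : Char} {opn cls : List Char} (fuel : Nat) (s : List Char)
    (hf : PySem.Chars.find s [c, c] = -1) :
    pvPassA c opn cls (fuel + 1) s = s := by
  have hIn : PySem.Chars.isIn [c, c] s = false := by
    rw [PySem.Chars.isIn_eq_false_iff, ← PySem.Chars.find_eq_neg_one_iff]
    exact hf
  simp [pvPassA, hIn]

theorem pvPassA_pre {c : Char} {opn cls : List Char} (pre : List Char) (hpre : pvClean c pre) :
    ∀ (fuel : Nat) (s : List Char),
      pvPassA c opn cls fuel (pre ++ s) = pre ++ pvPassA c opn cls fuel s := by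
  intro fuel
  induction fuel with
  | zero => intro s; rfl
  | succ fuel ih =>
    intro s
    rcases pvFind_cases c s with hf | ⟨i, hf⟩
    · rw [pvPassA_none fuel s hf, pvPassA_none fuel (pre ++ s) (pvFind_append_neg hpre s hf)]
    · have hfp : PySem.Chars.find (pre ++ s) [c, c] = ((pre.length + i : Nat) : Int) :=
        pvFind_append hpre s hf
      rcases pvFind_cases c (s.drop (i + 2)) with hg | ⟨j, hg⟩
      · have hgp : PySem.Chars.find ((pre ++ s).drop (pre.length + i + 2)) [c, c] = -1 := by
          rw [show pre.length + i + 2 = pre.length + (i + 2) by omega, pvDrop_append_len]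
          exact hg
        rw [pvPassA_stop fuel s hf hg, pvPassA_stop fuel (pre ++ s) hfp hgp]
      · have hgp : PySem.Chars.find ((pre ++ s).drop (pre.length + i + 2)) [c, c]
            = (j : Int) := by
          rw [show pre.length + i + 2 = pre.length + (i + 2) by omega, pvDrop_append_len]
          exact hg
        rw [pvPassA_step fuel s hf hg, pvPassA_step fuel (pre ++ s) hfp hgp]
        have e1 : (pre ++ s).take (pre.length + i) = pre ++ s.take i := pvTake_append_len pre s i
        have e2 : (pre ++ s).drop (pre.length + i + 2) = s.drop (i + 2) := by
          rw [show pre.length + i + 2 = pre.length + (i + 2) by omega, pvDrop_append_len]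
        have e3 : (pre ++ s).drop (pre.length + i + 2 + j + 2) = s.drop (i + 2 + j + 2) := by
          rw [show pre.length + i + 2 + j + 2 = pre.length + (i + 2 + j + 2) by omega,
            pvDrop_append_len]
        rw [e1, e2, e3]
        have := ih (s.take i ++ opn ++ (s.drop (i + 2)).take j ++ cls ++ s.drop (i + 2 + j + 2))
        simp only [List.append_assoc] at this ⊢
        exact this

theorem pvPassA_eq_fmtB {c : Char} {opn cls : List Char} (hopn : pvClean c opn)
    (hcls : pvClean c cls) :
    ∀ (fuel : Nat) (s : List Char), s.length ≤ fuel →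
      pvPassA c opn cls fuel s = pvFmtB c opn cls s := by
  intro fuel
  induction fuel with
  | zero =>
    intro s hs
    have : s = [] := by
      cases s
      · rfl
      · simp at hs
    subst this
    simp [pvPassA, pvFmtB, pvSplitOn_eq, pvRefSplit, pvPairsB]
  | succ fuel ih =>
    intro s hs
    rcases pvFind_cases c s with hf | ⟨i, hf⟩
    · rw [pvPassA_none fuel s hf]
      rw [pvFmtB, pvSplitOn_eq, pvRefSplit_no ((pvFind_neg c s).mp hf)]
      simp [pvPairsB]
    · obtain ⟨hocc, -⟩ := pvFind_spec' hf
      rcases pvFind_cases c (s.drop (i + 2)) with hg | ⟨j, hg⟩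
      · rw [pvPassA_stop fuel s hf hg]
        rw [pvFmtB, pvSplitOn_eq, pvRefSplit_found c s i hf,
          pvRefSplit_no ((pvFind_neg c _).mp hg)]
        simp only [pvPairsB]
        conv_lhs => rw [pvDecomp hocc]
        simp
      · obtain ⟨hocc2, -⟩ := pvFind_spec' hg
        have hlen2 := pvOcc_lt hocc2
        rw [pvPassA_step fuel s hf hg]
        have hpre : pvClean c (s.take i ++ opn ++ (s.drop (i + 2)).take j ++ cls) :=
          pvClean_append (pvClean_append (pvClean_append (pvTake_clean hf) hopn)
            (pvTake_clean hg)) hcls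
        rw [pvPassA_pre _ hpre fuel (s.drop (i + 2 + j + 2))]
        have htail : (s.drop (i + 2 + j + 2)).length ≤ fuel := by
          rw [List.length_drop]
          rw [List.length_drop] at hlen2
          omega
        rw [ih _ htail]
        -- B side
        have hsp2 : pvRefSplit c (s.drop (i + 2))
            = (s.drop (i + 2)).take j :: pvRefSplit c (s.drop (i + 2 + j + 2)) := by
          rw [pvRefSplit_found c (s.drop (i + 2)) j hg, List.drop_drop]
          rw [show i + 2 + (j + 2) = i + 2 + j + 2 by omega]
        rcases h0 : pvRefSplit c (s.drop (i + 2 + j + 2)) with _ | ⟨p0, rest⟩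
        · exact absurd h0 (pvRefSplit_ne_nil c _)
        · have hB : pvFmtB c opn cls s
              = s.take i ++ (opn ++ (s.drop (i + 2)).take j ++ cls ++ p0
                ++ pvPairsB c opn cls rest) := by
            rw [pvFmtB, pvSplitOn_eq, pvRefSplit_found c s i hf, hsp2, h0]
            simp [pvPairsB]
          have hB2 : pvFmtB c opn cls (s.drop (i + 2 + j + 2))
              = p0 ++ pvPairsB c opn cls rest := by
            rw [pvFmtB, pvSplitOn_eq, h0]
          rw [hB, hB2]
          simp [List.append_assoc]

theorem pvInlineA_eq (t : List Char) :
    pvInlineA t = pvFmtB '_' "<em>".toList "</em>".toList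
      (pvFmtB '*' "<b>".toList "</b>".toList t) := by
  have hb1 : pvClean '*' "<b>".toList := (pvClean_iff _ _).mpr (by decide)
  have hb2 : pvClean '*' "</b>".toList := (pvClean_iff _ _).mpr (by decide)
  have he1 : pvClean '_' "<em>".toList := (pvClean_iff _ _).mpr (by decide)
  have he2 : pvClean '_' "</em>".toList := (pvClean_iff _ _).mpr (by decide)
  unfold pvInlineA
  rw [pvPassA_eq_fmtB hb1 hb2 _ _ (by omega)]
  rw [pvPassA_eq_fmtB he1 he2 _ _ (by omega)]

theorem pvLevelLoop_eq (cs : List Char) : ∀ lv : Nat,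
    pvLevelLoop cs lv = lv + (cs.takeWhile (· = '#')).length := by
  induction cs with
  | nil => intro lv; simp [pvLevelLoop]
  | cons x rest ih =>
    intro lv
    by_cases hx : x = '#'
    · simp only [pvLevelLoop, List.takeWhile_cons, hx]
      rw [ih]
      simp
      omega
    · simp [pvLevelLoop, hx]

theorem pvDropWhile_eq_drop (p : Char → Bool) (l : List Char) :
    l.dropWhile p = l.drop (l.takeWhile p).length := by
  induction l with
  | nil => simp
  | cons x rest ih =>
    by_cases h : p x <;> simp [h, ih]

-- ===== VERDICT (by name: the statement is the Claim_ definition above) =====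
theorem parse_heading_spec : Claim_equal_parse_heading := by
  intro line _
  show parse_heading line = parse_heading_alt line
  unfold parse_heading parse_heading_alt
  have hlevel : pvLevelLoop line.toList 0 = (line.toList.takeWhile (· = '#')).length := by
    simpa using pvLevelLoop_eq line.toList 0
  have hrest : line.toList.dropWhile (· = '#')
      = line.toList.drop (line.toList.takeWhile (· = '#')).length :=
    pvDropWhile_eq_drop _ _
  have htwle : (line.toList.takeWhile (· = '#')).length ≤ line.toList.length :=
    (List.takeWhile_sublist _).length_le
  have hlevelB : line.toList.length - (line.toList.dropWhile (· = '#')).length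
      = (line.toList.takeWhile (· = '#')).length := by
    rw [hrest, List.length_drop]
    omega
  by_cases hs : PySem.Chars.startswith line.toList "#".toList = true
  · have hslice : PySem.List.slice line.toList
        (some (((line.toList.takeWhile (· = '#')).length : Nat) : Int)) none
        = line.toList.dropWhile (· = '#') := by
      rw [PySem.List.slice_from _ (by positivity), Int.toNat_natCast, hrest]
    simp only [hlevel, hlevelB, hslice, pvInlineA_eq]
    rw [if_pos hs]
  · have htw : (line.toList.takeWhile (· = '#')).length = 0 := by
      rcases hcs : line.toList with _ | ⟨x, r⟩
      · simp
      · have hx : ¬ x = '#' := by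
          intro hx
          apply hs
          rw [PySem.Chars.startswith, hcs]
          subst hx
          simp [List.isPrefixOf]
        simp [hx]
    rw [if_neg hs]
    simp only [hlevelB, htw]
    rw [if_neg (by omega)]
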